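-- pv_equiv track=rewrite | github.com/drago1234/omni-npu | src/omni_npu/v1/utils.py | get_nth_last_sep_pos
-- ===== SOURCE A (Python) =====
-- def get_nth_last_sep_pos(s: str, sep: str = '.', n: int = 2) -> int:
--     if n < 1 or not sep:
--         return -1
--
--     current_pos = len(s)
--     for _ in range(n):
--         current_pos = s.rfind(sep, 0, current_pos)
--         if current_pos == -1:
--             return -1
--     return current_pos
-- ===== SOURCE B (Python) =====
-- def get_nth_last_sep_pos(s: str, sep: str = '.', n: int = 2) -> int:
--     if n < 1 or not sep:
--         return -1
--     parts = s.rsplit(sep, n)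
--     return len(parts[0]) if len(parts) == n + 1 else -1
-- ===== Notes on version B (the rewrite author's own statement) =====
-- stated objective: idiomatic
-- what changed: Replaces A's Python-level loop of n backward rfind calls by a single rsplit(sep, n) and derives the position as the length of the first part when exactly n splits occurred.
import Mathlib
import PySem

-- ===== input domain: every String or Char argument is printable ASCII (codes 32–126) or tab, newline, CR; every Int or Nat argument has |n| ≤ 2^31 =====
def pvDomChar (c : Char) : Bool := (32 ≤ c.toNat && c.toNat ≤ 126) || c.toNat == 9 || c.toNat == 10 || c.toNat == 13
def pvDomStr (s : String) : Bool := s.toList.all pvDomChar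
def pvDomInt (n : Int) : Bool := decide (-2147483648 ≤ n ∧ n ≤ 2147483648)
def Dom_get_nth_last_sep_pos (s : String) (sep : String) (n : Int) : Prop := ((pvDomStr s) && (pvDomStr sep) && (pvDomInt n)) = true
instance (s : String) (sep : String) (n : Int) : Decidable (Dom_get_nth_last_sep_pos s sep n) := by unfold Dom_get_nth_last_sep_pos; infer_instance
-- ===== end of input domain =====

-- B replaces A's backward rfind loop by one rsplit(sep, n) and length arithmetic (idiomatic decomposition).

-- ===== PORT A =====
def pvLoopA (s sep : String) : Nat → Int → Int
  | 0, cur => cur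
  | k+1, cur =>
      let p := PySem.Str.rfindFrom s sep 0 (some cur)
      if p = -1 then -1 else pvLoopA s sep k p

def get_nth_last_sep_pos (s : String) (sep : String) (n : Int) : Int :=
  if n < 1 ∨ sep = "" then -1
  else pvLoopA s sep n.toNat (PySem.Str.len s)

-- ===== PORT B =====
-- hand port of str.rsplit(sep, maxsplit) for sep ≠ '' (PySem has no rsplit):
-- backward greedy non-overlapping matching, exact per CPython on that domain.
def pvRsplit (sep : List Char) : List Char → Nat → List (List Char)
  | t, 0 => [t]
  | t, k+1 =>
      let i := PySem.Chars.rfind t sep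
      if i = -1 then [t]
      else pvRsplit sep (t.take i.toNat) k ++ [t.drop (i.toNat + sep.length)]

def get_nth_last_sep_pos_alt (s : String) (sep : String) (n : Int) : Int :=
  if n < 1 ∨ sep = "" then -1
  else
    let parts := pvRsplit sep.toList s.toList n.toNat
    if parts.length = n.toNat + 1 then ((parts.headD []).length : Int) else -1

-- ===== PRECONDITION & SPEC =====
def Spec_get_nth_last_sep_pos (s : String) (sep : String) (n : Int) (out : Int) : Prop := out = get_nth_last_sep_pos_alt s sep n
instance (s : String) (sep : String) (n : Int) (out : Int) : Decidable (Spec_get_nth_last_sep_pos s sep n out) := by unfold Spec_get_nth_last_sep_pos; infer_instance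

-- ===== CLAIM (what is proved, stated in full; the proofs are below) =====
def Claim_equal_get_nth_last_sep_pos : Prop := ∀ (s : String) (sep : String) (n : Int), Dom_get_nth_last_sep_pos s sep n → Spec_get_nth_last_sep_pos s sep n (get_nth_last_sep_pos s sep n)

-- ===== LEMMAS AND PROOFS =====

-- proof-side mirror of A's loop acting on the current prefix itself
def pvAux (sep : List Char) : Nat → List Char → Int
  | 0, t => t.length
  | k+1, t =>
      let i := PySem.Chars.rfind t sep
      if i = -1 then -1 else pvAux sep k (t.take i.toNat)

theorem pv_rfind_go_ge (s sub : List Char) (k : Nat) : -1 ≤ PySem.Chars.rfind.go s sub k := by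
  induction k with
  | zero => simp [PySem.Chars.rfind.go]; split <;> omega
  | succ j ih => simp [PySem.Chars.rfind.go]; split <;> omega

theorem pv_rfind_go_le (s sub : List Char) (k : Nat) : PySem.Chars.rfind.go s sub k ≤ k := by
  induction k with
  | zero => simp [PySem.Chars.rfind.go]; split <;> omega
  | succ j ih => simp [PySem.Chars.rfind.go]; split <;> omega

theorem pv_rfind_ge (s sub : List Char) : -1 ≤ PySem.Chars.rfind s sub :=
  pv_rfind_go_ge s sub s.length

theorem pv_rfind_le (s sub : List Char) : PySem.Chars.rfind s sub ≤ s.length :=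
  pv_rfind_go_le s sub s.length

theorem pv_rfindFrom_take (s sub : List Char) (cur : Int) (h0 : 0 ≤ cur)
    (h1 : cur ≤ s.length) :
    PySem.Chars.rfindFrom s sub 0 (some cur) = PySem.Chars.rfind (s.take cur.toNat) sub := by
  simp only [PySem.Chars.rfindFrom]
  split_ifs <;> simp_all <;> omega

theorem pv_loop_eq_aux (s sep : String) (k : Nat) :
    ∀ cur : Int, 0 ≤ cur → cur ≤ s.toList.length →
    pvLoopA s sep k cur = pvAux sep.toList k (s.toList.take cur.toNat) := by
  induction k with
  | zero =>
    intro cur h0 h1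
    simp only [pvLoopA, pvAux, List.length_take]
    omega
  | succ j ih =>
    intro cur h0 h1
    have hb : PySem.Str.rfindFrom s sep 0 (some cur)
        = PySem.Chars.rfind (s.toList.take cur.toNat) sep.toList := by
      rw [PySem.Str.rfindFrom_eq]
      exact pv_rfindFrom_take _ _ _ h0 h1
    simp only [pvLoopA, pvAux, hb]
    split
    · rfl
    · rename_i hne
      have hge : -1 ≤ PySem.Chars.rfind (s.toList.take cur.toNat) sep.toList := pv_rfind_ge _ _
      have hle : PySem.Chars.rfind (s.toList.take cur.toNat) sep.toList ≤ (s.toList.take cur.toNat).length := pv_rfind_le _ _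
      set p := PySem.Chars.rfind (s.toList.take cur.toNat) sep.toList with hp
      have hlen : ((s.toList.take cur.toNat).length : Int) ≤ s.toList.length := by
        simp [List.length_take]
      have h0p : 0 ≤ p := by omega
      have h1p : p ≤ s.toList.length := le_trans hle hlen
      rw [ih p h0p h1p]
      have : (s.toList.take cur.toNat).take p.toNat = s.toList.take p.toNat := by
        rw [List.take_take]
        congr 1
        have : (p.toNat : Int) ≤ ((s.toList.take cur.toNat).length : Int) := by omega
        simp [List.length_take] at this
        omega
      rw [this]

theorem pv_rsplit_ne_nil (sep t : List Char) (k : Nat) : pvRsplit sep t k ≠ [] := by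
  cases k with
  | zero => simp [pvRsplit]
  | succ j =>
    simp only [pvRsplit]
    split
    · simp
    · simp

theorem pv_main (sep : List Char) (k : Nat) :
    ∀ t : List Char,
      ((pvRsplit sep t k).length = k + 1 →
        pvAux sep k t = (((pvRsplit sep t k).headD []).length : Int)) ∧
      ((pvRsplit sep t k).length ≠ k + 1 → pvAux sep k t = -1) := by
  induction k with
  | zero =>
    intro t
    constructor
    · intro _; simp [pvRsplit, pvAux]
    · intro h; exact absurd (by simp [pvRsplit]) h
  | succ j ih =>
    intro t
    simp only [pvRsplit, pvAux]
    split
    · constructor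
      · intro h; simp at h
      · intro _; rfl
    · rename_i hne
      set i := PySem.Chars.rfind t sep with hi
      have hinner := ih (t.take i.toNat)
      have hlen : (pvRsplit sep (t.take i.toNat) j ++ [t.drop (i.toNat + sep.length)]).length
          = (pvRsplit sep (t.take i.toNat) j).length + 1 := by simp
      have hhead : (pvRsplit sep (t.take i.toNat) j ++ [t.drop (i.toNat + sep.length)]).headD []
          = (pvRsplit sep (t.take i.toNat) j).headD [] := by
        have h := List.head?_append_of_ne_nil (pvRsplit sep (t.take i.toNat) j)
          (l₂ := [t.drop (i.toNat + sep.length)]) (pv_rsplit_ne_nil sep (t.take i.toNat) j)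
        simp only [List.headD_eq_head?_getD, h]
      constructor
      · intro h
        rw [hlen] at h
        have : (pvRsplit sep (t.take i.toNat) j).length = j + 1 := by omega
        rw [hhead]
        exact hinner.1 this
      · intro h
        rw [hlen] at h
        have : (pvRsplit sep (t.take i.toNat) j).length ≠ j + 1 := by omega
        exact hinner.2 this

-- ===== VERDICT (by name: the statement is the Claim_ definition above) =====
theorem get_nth_last_sep_pos_spec : Claim_equal_get_nth_last_sep_pos := by
  intro s sep n _
  unfold Spec_get_nth_last_sep_pos
  unfold get_nth_last_sep_pos get_nth_last_sep_pos_alt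
  split
  · rfl
  · have hlen : PySem.Str.len s = (s.toList.length : Int) := by
      simp [PySem.Str.len_eq]
    rw [hlen, pv_loop_eq_aux s sep n.toNat (s.toList.length : Int) (by omega) (by omega)]
    have htake : s.toList.take ((s.toList.length : Int)).toNat = s.toList := by
      simp
    rw [htake]
    have h := pv_main sep.toList n.toNat s.toList
    by_cases hc : (pvRsplit sep.toList s.toList n.toNat).length = n.toNat + 1
    · rw [if_pos hc]
      exact h.1 hc
    · rw [if_neg hc]
      exact h.2 hc
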